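-- pv_equiv track=rewrite | github.com/graphsignal/solver-demo | solutions/1010-C.py | find_divine_numbers
-- ===== SOURCE A (Python) =====
-- def find_divine_numbers(n, k, denominations):
--     # Initialize reachable as a set containing 0
--     reachable = {0}
--     for denomination in denominations:
--         b_i = denomination % k
--         new_reachable = set(reachable)  # Make copy of current reachable set
--         for residue in reachable:
--             new_residue = (residue + b_i) % k
--             new_reachable.add(new_residue)
--         reachable = new_reachable
--
--     result = sorted(list(reachable))
--     return len(result), result
-- ===== SOURCE B (Python) =====
-- def _union(xs, ys):
--     """Merge two strictly increasing lists into one, dropping duplicates."""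
--     out = []
--     i = j = 0
--     while i < len(xs) and j < len(ys):
--         if xs[i] < ys[j]:
--             out.append(xs[i]); i += 1
--         elif ys[j] < xs[i]:
--             out.append(ys[j]); j += 1
--         else:
--             out.append(xs[i]); i += 1; j += 1
--     out.extend(xs[i:])
--     out.extend(ys[j:])
--     return out
--
-- def find_divine_numbers(n, k, denominations):
--     m = abs(k)
--     reach = [0]  # strictly increasing residues mod m whose class is a reachable subset sum
--     for d in denominations:
--         b = d % m
--         # shifting every residue by b mod m splits reach into two increasing runs
--         lo = [r + b for r in reach if r < m - b]
--         hi = [r + b - m for r in reach if r >= m - b]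
--         reach = _union(reach, hi + lo)
--     result = sorted(r % k for r in reach)
--     return len(result), result
-- ===== Notes on version B (the rewrite author's own statement) =====
-- stated objective: alternative
-- what changed: Replaces A's hash-set of reachable residues (copy + inner loop + final sort of a set) by a strictly increasing sorted list maintained directly: each denomination shifts it into two increasing runs split at the wrap point and a two-pointer merge-union combines them, the whole computation normalised to nonnegative residues mod |k|.
-- outside the precondition, e.g. on find_divine_numbers(0, 0, []): A returns (1, [0]), B raises ZeroDivisionError
import Mathlib
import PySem

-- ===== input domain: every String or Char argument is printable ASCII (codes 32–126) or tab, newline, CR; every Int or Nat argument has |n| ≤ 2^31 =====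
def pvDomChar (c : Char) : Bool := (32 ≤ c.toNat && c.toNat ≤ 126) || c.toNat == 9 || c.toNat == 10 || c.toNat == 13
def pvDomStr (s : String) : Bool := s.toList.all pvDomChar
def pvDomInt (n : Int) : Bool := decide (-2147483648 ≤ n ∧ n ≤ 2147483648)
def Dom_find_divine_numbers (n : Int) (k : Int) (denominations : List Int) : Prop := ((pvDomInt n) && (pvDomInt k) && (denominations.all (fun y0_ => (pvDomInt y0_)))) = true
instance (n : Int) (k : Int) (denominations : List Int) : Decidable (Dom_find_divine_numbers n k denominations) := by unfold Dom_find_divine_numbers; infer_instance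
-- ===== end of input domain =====

-- B replaces A's hash-set breadth step by a strictly increasing sorted residue list updated by a wrap-point split and a two-pointer merge-union (alternative data structure; return value only, no mutation in either).

-- ===== PORT A =====
-- one pass of A's outer loop: copy the set, then add (residue + b_i) % k for every residue
def stepA (k : Int) (reachable : PySem.Set Int) (denomination : Int) : PySem.Set Int :=
  let b_i := PySem.Int.mod denomination k
  reachable.foldl
    (fun new_reachable residue => PySem.Set.add new_reachable (PySem.Int.mod (residue + b_i) k))
    (PySem.Set.ofList reachable)

def find_divine_numbers (n : Int) (k : Int) (denominations : List Int) : Int × List Int :=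
  let reachable : PySem.Set Int := PySem.Set.ofList [0]
  let reachable := denominations.foldl (stepA k) reachable
  let result := PySem.List.sorted reachable (fun x => x) false
  ((result.length : Int), result)

-- ===== PORT B =====
-- _union(xs, ys): two-pointer merge of two strictly increasing lists, dropping duplicates
def pvUnion : List Int → List Int → List Int
  | [], ys => ys
  | x :: xs, [] => x :: xs
  | x :: xs, y :: ys =>
    if x < y then x :: pvUnion xs (y :: ys)
    else if y < x then y :: pvUnion (x :: xs) ys
    else x :: pvUnion xs ys
termination_by xs ys => xs.length + ys.length

-- one pass of B's loop: shift every residue by b mod m (two increasing runs), then merge-union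
def stepB (m : Int) (reach : List Int) (d : Int) : List Int :=
  let b := PySem.Int.mod d m
  let lo := (reach.filter (fun r => decide (r < m - b))).map (fun r => r + b)
  let hi := (reach.filter (fun r => decide (m - b ≤ r))).map (fun r => r + b - m)
  pvUnion reach (hi ++ lo)

def find_divine_numbers_alt (n : Int) (k : Int) (denominations : List Int) : Int × List Int :=
  let m : Int := |k|
  let reach : List Int := denominations.foldl (stepB m) [0]
  let result := PySem.List.sorted
      (reach.map (fun r => PySem.Int.mod r k)) (fun x => x) false
  ((result.length : Int), result)

-- ===== PRECONDITION & SPEC =====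
-- Pre_ excludes only k = 0: there A raises ZeroDivisionError on any nonempty denominations list, and on the
-- empty list (where A's loop never touches k and returns (1,[0])) B itself raises ZeroDivisionError on r % 0.
def Pre_find_divine_numbers (n : Int) (k : Int) (denominations : List Int) : Prop := k ≠ 0
instance (n : Int) (k : Int) (denominations : List Int) : Decidable (Pre_find_divine_numbers n k denominations) := by unfold Pre_find_divine_numbers; infer_instance
def pvWitness_find_divine_numbers : Int × Int × List Int := (2, 3, [5, 7])

def Spec_find_divine_numbers (n : Int) (k : Int) (denominations : List Int) (out : Int × List Int) : Prop := out = find_divine_numbers_alt n k denominations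
instance (n : Int) (k : Int) (denominations : List Int) (out : Int × List Int) : Decidable (Spec_find_divine_numbers n k denominations out) := by unfold Spec_find_divine_numbers; infer_instance

-- ===== CLAIM (what is proved, stated in full; the proofs are below) =====
def Claim_equal_find_divine_numbers : Prop := ∀ (n : Int) (k : Int) (denominations : List Int), Dom_find_divine_numbers n k denominations → Pre_find_divine_numbers n k denominations → Spec_find_divine_numbers n k denominations (find_divine_numbers n k denominations)

-- ===== LEMMAS AND PROOFS =====

-- canonical Python representative of the residue class r modulo k
def emb (k : Int) (r : Nat) : Int := PySem.Int.mod (r : Int) k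

-- Python's mod x k is characterised by congruence + the canonical range (sign of the divisor)
theorem pymod_sub_dvd (k x : Int) : k ∣ PySem.Int.mod x k - x := by
  have h := PySem.Int.floordiv_mul_add_mod x k
  exact ⟨-(PySem.Int.floordiv x k), by linarith [h]⟩

theorem pymod_eq_of {k x y : Int} (hk : k ≠ 0) (hdvd : k ∣ x - y)
    (hy : (0 < k → 0 ≤ y ∧ y < k) ∧ (k < 0 → k < y ∧ y ≤ 0)) : PySem.Int.mod x k = y := by
  have h1 : k ∣ PySem.Int.mod x k - x := pymod_sub_dvd k x
  have h2 : k ∣ PySem.Int.mod x k - y := by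
    have := dvd_add h1 hdvd
    simpa using this
  rcases h2 with ⟨c, hc⟩
  rcases lt_trichotomy k 0 with hlt | he | hgt
  · have hb := PySem.Int.mod_neg_bounds (a := x) hlt
    have hy' := hy.2 hlt
    have hc0 : c = 0 := by nlinarith [hb.1, hb.2, hy'.1, hy'.2]
    simp [hc0] at hc; omega
  · omega
  · have hb1 := PySem.Int.mod_nonneg (a := x) hgt
    have hb2 := PySem.Int.mod_lt (a := x) hgt
    have hy' := hy.1 hgt
    have hc0 : c = 0 := by nlinarith
    simp [hc0] at hc; omega

theorem pymod_congr {k x y : Int} (hk : k ≠ 0) (hdvd : k ∣ x - y) :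
    PySem.Int.mod x k = PySem.Int.mod y k := by
  apply pymod_eq_of hk
  · have h1 := pymod_sub_dvd k y
    have h2 : k ∣ (x - y) - (PySem.Int.mod y k - y) := dvd_sub hdvd h1
    have h3 : (x - y) - (PySem.Int.mod y k - y) = x - PySem.Int.mod y k := by ring
    rwa [h3] at h2
  · constructor
    · intro hgt
      exact ⟨PySem.Int.mod_nonneg (a := y) hgt, PySem.Int.mod_lt (a := y) hgt⟩
    · intro hlt
      exact PySem.Int.mod_neg_bounds (a := y) hlt

-- closed forms of emb on [0, |k|)
theorem emb_pos {k : Int} (hk : 0 < k) (r : Nat) (hr : r < k.natAbs) : emb k r = (r : Int) := by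
  apply pymod_eq_of (by omega) (by simp)
  refine ⟨fun _ => ⟨by positivity, ?_⟩, fun h => absurd h (by omega)⟩
  omega

theorem emb_neg {k : Int} (hk : k < 0) (r : Nat) (hr : r < k.natAbs) :
    emb k r = if r = 0 then 0 else (r : Int) + k := by
  apply pymod_eq_of (by omega)
  · split
    · simp_all
    · exact ⟨-1, by ring⟩
  · refine ⟨fun h => absurd h (by omega), fun _ => ?_⟩
    split <;> omega

theorem emb_inj {k : Int} (hk : k ≠ 0) {r r' : Nat} (hr : r < k.natAbs) (hr' : r' < k.natAbs)
    (h : emb k r = emb k r') : r = r' := by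
  rcases lt_or_gt_of_ne hk with hlt | hgt
  · rw [emb_neg hlt r hr, emb_neg hlt r' hr'] at h
    split_ifs at h <;> omega
  · rw [emb_pos hgt r hr, emb_pos hgt r' hr'] at h
    omega

-- every Python residue mod k equals emb of a unique r < |k|
theorem pymod_is_emb {k : Int} (hk : k ≠ 0) (x : Int) :
    ∃ r < k.natAbs, PySem.Int.mod x k = emb k r := by
  rcases lt_or_gt_of_ne hk with hlt | hgt
  · have hb := PySem.Int.mod_neg_bounds (a := x) hlt
    by_cases h0 : PySem.Int.mod x k = 0
    · exact ⟨0, by omega, by rw [h0, emb_neg hlt 0 (by omega)]; simp⟩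
    · refine ⟨(PySem.Int.mod x k - k).toNat, by omega, ?_⟩
      rw [emb_neg hlt _ (by omega)]
      split_ifs with h <;> omega
  · have hb1 := PySem.Int.mod_nonneg (a := x) hgt
    have hb2 := PySem.Int.mod_lt (a := x) hgt
    refine ⟨(PySem.Int.mod x k).toNat, by omega, ?_⟩
    rw [emb_pos hgt _ (by omega)]
    omega

-- |k| divides a difference iff k does
theorem natAbs_dvd_of {k x : Int} (h : (k.natAbs : Int) ∣ x) : k ∣ x :=
  (Int.natAbs_dvd).mp h

-- moving a step: mod (emb r0 + b') k = emb ((r0 + b) % m) when b' ≡ b  (mod k), b the Nat residue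
theorem step_emb {k : Int} (hk : k ≠ 0) {r0 b : Nat} {b' : Int}
    (hb' : k ∣ b' - (b : Int)) :
    PySem.Int.mod (emb k r0 + b') k = emb k ((r0 + b) % k.natAbs) := by
  apply pymod_congr hk
  have h1 : k ∣ emb k r0 - (r0 : Int) := pymod_sub_dvd k (r0 : Int)
  have h2 : k ∣ ((r0 + b : Nat) : Int) - (((r0 + b) % k.natAbs : Nat) : Int) := by
    apply natAbs_dvd_of
    have hle : (r0 + b) % k.natAbs ≤ r0 + b := Nat.mod_le _ _
    have hdn : k.natAbs ∣ (r0 + b) - (r0 + b) % k.natAbs := by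
      have := Nat.div_add_mod (r0 + b) k.natAbs
      exact ⟨(r0 + b) / k.natAbs, by omega⟩
    rw [← Int.ofNat_sub hle]
    exact_mod_cast hdn
  have := dvd_add (dvd_add h1 hb') h2
  have h3 : emb k r0 - ↑r0 + (b' - ↑b) + (↑(r0 + b) - ↑((r0 + b) % k.natAbs))
      = emb k r0 + b' - ↑((r0 + b) % k.natAbs) := by push_cast; ring
  rwa [h3] at this

theorem mem_pvUnion (xs ys : List Int) (z : Int) : z ∈ pvUnion xs ys ↔ z ∈ xs ∨ z ∈ ys := by
  induction xs, ys using pvUnion.induct with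
  | case1 ys => simp [pvUnion]
  | case2 x xs => simp [pvUnion]
  | case3 x xs y ys h ih => rw [pvUnion]; simp [h, ih]; tauto
  | case4 x xs y ys h1 h2 ih => rw [pvUnion]; simp [h1, h2, ih]; tauto
  | case5 x xs y ys h1 h2 ih =>
    rw [pvUnion]; simp [h1, h2, ih]
    have : y = x := by omega
    simp [this]; tauto

theorem pairwise_pvUnion (xs ys : List Int) (hx : xs.Pairwise (· < ·))
    (hy : ys.Pairwise (· < ·)) : (pvUnion xs ys).Pairwise (· < ·) := by
  induction xs, ys using pvUnion.induct with
  | case1 ys => simpa [pvUnion] using hy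
  | case2 x xs => simpa [pvUnion] using hx
  | case3 x xs y ys h ih =>
    rw [pvUnion]; simp only [if_pos h]
    rw [List.pairwise_cons] at hx ⊢
    refine ⟨?_, ih hx.2 hy⟩
    intro z hz
    rw [mem_pvUnion] at hz
    rcases hz with hz | hz
    · exact hx.1 z hz
    · rcases List.mem_cons.mp hz with rfl | hz
      · exact h
      · exact lt_trans h ((List.pairwise_cons.mp hy).1 z hz)
  | case4 x xs y ys h1 h2 ih =>
    rw [pvUnion]; simp only [if_neg h1, if_pos h2]
    rw [List.pairwise_cons] at hy ⊢
    refine ⟨?_, ih hx hy.2⟩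
    intro z hz
    rw [mem_pvUnion] at hz
    rcases hz with hz | hz
    · rcases List.mem_cons.mp hz with rfl | hz
      · exact h2
      · exact lt_trans h2 ((List.pairwise_cons.mp hx).1 z hz)
    · exact hy.1 z hz
  | case5 x xs y ys h1 h2 ih =>
    rw [pvUnion]; simp only [if_neg h1, if_neg h2]
    have hxy : y = x := by omega
    rw [List.pairwise_cons] at hx hy ⊢
    refine ⟨?_, ih hx.2 hy.2⟩
    intro z hz
    rw [mem_pvUnion] at hz
    rcases hz with hz | hz
    · exact hx.1 z hz
    · exact hxy ▸ hy.1 z hz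

def ReachInv (k : Int) (s : List Int) (reach : List Int) : Prop :=
  s.Nodup ∧ (∀ x ∈ s, ∃ r < k.natAbs, x = emb k r) ∧
  reach.Pairwise (· < ·) ∧ (∀ z ∈ reach, 0 ≤ z ∧ z < (k.natAbs : Int)) ∧
  (∀ r : Nat, r < k.natAbs → ((r : Int) ∈ reach ↔ emb k r ∈ s))

theorem foldl_add_mem {y : Int} (l : List Int) (init : PySem.Set Int) (f : Int → Int) :
    y ∈ l.foldl (fun nr r => PySem.Set.add nr (f r)) init ↔ y ∈ init ∨ ∃ x ∈ l, y = f x := by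
  induction l generalizing init with
  | nil => simp
  | cons a t ih => simp [ih, PySem.Set.mem_add]; tauto

theorem foldl_add_nodup (l : List Int) (init : PySem.Set Int) (f : Int → Int)
    (h : init.Nodup) : (l.foldl (fun nr r => PySem.Set.add nr (f r)) init).Nodup := by
  induction l generalizing init with
  | nil => exact h
  | cons a t ih => exact ih _ (PySem.Set.nodup_add _ _ h)

theorem reach_inv_step {k : Int} (hk : k ≠ 0) {s reach : List Int}
    (h : ReachInv k s reach) (d : Int) : ReachInv k (stepA k s d) (stepB |k| reach d) := by
  obtain ⟨hnd, hrange, hpw, hbnd, hlink⟩ := h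
  have hm : 0 < k.natAbs := Int.natAbs_pos.mpr hk
  have habs : |k| = (k.natAbs : Int) := Int.abs_eq_natAbs k
  have hmpos : (0 : Int) < (k.natAbs : Int) := by exact_mod_cast hm
  set b' := PySem.Int.mod d k with hb'def
  set bI := PySem.Int.mod d ((k.natAbs : Int)) with hbIdef
  have hbn : (0:Int) ≤ bI := PySem.Int.mod_nonneg (a := d) hmpos
  have hbl : bI < (k.natAbs : Int) := PySem.Int.mod_lt (a := d) hmpos
  have hbN : (bI.toNat : Int) = bI := Int.toNat_of_nonneg hbn
  -- b' ≡ bI (mod k)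
  have hbb : k ∣ b' - (bI.toNat : Int) := by
    have h1 : k ∣ b' - d := pymod_sub_dvd k d
    have h2 : k ∣ d - (bI.toNat : Int) := by
      apply natAbs_dvd_of
      have h3 := pymod_sub_dvd ((k.natAbs : Int)) d
      rw [← hbIdef] at h3
      rw [hbN]
      have := dvd_neg.mpr h3
      simpa using this
    have := dvd_add h1 h2
    have he : b' - d + (d - (bI.toNat:Int)) = b' - (bI.toNat:Int) := by ring
    rwa [he] at this
  have hmem : ∀ y, y ∈ stepA k s d ↔ y ∈ s ∨ ∃ x ∈ s, y = PySem.Int.mod (x + b') k := by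
    intro y
    unfold stepA
    rw [foldl_add_mem]
    simp only [PySem.Set.mem_ofList]
    exact Iff.rfl
  -- the two shifted runs of B's step
  have hstep : stepB |k| reach d
      = pvUnion reach
          (((reach.filter (fun r => decide ((k.natAbs:Int) - bI ≤ r))).map (fun r => r + bI - (k.natAbs:Int)))
            ++ ((reach.filter (fun r => decide (r < (k.natAbs:Int) - bI))).map (fun r => r + bI))) := by
    unfold stepB
    rw [habs, ← hbIdef]
  have hHL : ∀ z : Int,
      (z ∈ ((reach.filter (fun r => decide ((k.natAbs:Int) - bI ≤ r))).map (fun r => r + bI - (k.natAbs:Int)))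
            ++ ((reach.filter (fun r => decide (r < (k.natAbs:Int) - bI))).map (fun r => r + bI)))
        ↔ ∃ r0 : Nat, r0 < k.natAbs ∧ (r0 : Int) ∈ reach ∧ z = (((r0 + bI.toNat) % k.natAbs : Nat) : Int) := by
    intro z
    simp only [List.mem_append, List.mem_map, List.mem_filter, decide_eq_true_eq]
    constructor
    · rintro (⟨r, ⟨hr, hge⟩, rfl⟩ | ⟨r, ⟨hr, hlt'⟩, rfl⟩)
      · obtain ⟨hr0, hrm⟩ := hbnd r hr
        refine ⟨r.toNat, by omega, by rwa [Int.toNat_of_nonneg hr0], ?_⟩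
        have hmod : (r.toNat + bI.toNat) % k.natAbs = r.toNat + bI.toNat - k.natAbs := by
          rw [Nat.mod_eq_sub_mod (by omega), Nat.mod_eq_of_lt (by omega)]
        rw [hmod]; omega
      · obtain ⟨hr0, hrm⟩ := hbnd r hr
        refine ⟨r.toNat, by omega, by rwa [Int.toNat_of_nonneg hr0], ?_⟩
        have hmod : (r.toNat + bI.toNat) % k.natAbs = r.toNat + bI.toNat := by
          rw [Nat.mod_eq_of_lt (by omega)]
        rw [hmod]; omega
    · rintro ⟨r0, hr0, hmemr, rfl⟩
      by_cases hc : (r0 : Int) < (k.natAbs:Int) - bI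
      · refine Or.inr ⟨(r0 : Int), ⟨hmemr, hc⟩, ?_⟩
        have hmod : (r0 + bI.toNat) % k.natAbs = r0 + bI.toNat := by
          rw [Nat.mod_eq_of_lt (by omega)]
        rw [hmod]; omega
      · refine Or.inl ⟨(r0 : Int), ⟨hmemr, by omega⟩, ?_⟩
        have hmod : (r0 + bI.toNat) % k.natAbs = r0 + bI.toNat - k.natAbs := by
          rw [Nat.mod_eq_sub_mod (by omega), Nat.mod_eq_of_lt (by omega)]
        rw [hmod]; omega
  refine ⟨?_, ?_, ?_, ?_, ?_⟩
  · exact foldl_add_nodup _ _ _ (PySem.Set.nodup_ofList _)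
  · intro x hx
    rcases (hmem x).mp hx with hx' | ⟨x0, hx0, hx'⟩
    · exact hrange x hx'
    · obtain ⟨r, hrlt, hre⟩ := pymod_is_emb hk (x0 + b')
      exact ⟨r, hrlt, by rw [hx', hre]⟩
  · rw [hstep]
    apply pairwise_pvUnion _ _ hpw
    rw [List.pairwise_append]
    refine ⟨?_, ?_, ?_⟩
    · rw [List.pairwise_map]
      exact (hpw.filter _).imp (fun h => by omega)
    · rw [List.pairwise_map]
      exact (hpw.filter _).imp (fun h => by omega)
    · intro a ha b hb
      simp only [List.mem_map, List.mem_filter, decide_eq_true_eq] at ha hb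
      obtain ⟨r1, ⟨hr1, hge⟩, rfl⟩ := ha
      obtain ⟨r2, ⟨hr2, hlt'⟩, rfl⟩ := hb
      obtain ⟨h10, h1m⟩ := hbnd r1 hr1
      obtain ⟨h20, h2m⟩ := hbnd r2 hr2
      omega
  · rw [hstep]
    intro z hz
    rw [mem_pvUnion] at hz
    rcases hz with hz | hz
    · exact hbnd z hz
    · obtain ⟨r0, hr0, _, rfl⟩ := (hHL z).mp hz
      have := Nat.mod_lt (r0 + bI.toNat) (y := k.natAbs) (by omega)
      omega
  · intro r hr
    rw [hstep, mem_pvUnion, hHL, hmem]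
    constructor
    · rintro (hin | ⟨r0, hr0, hmemr, he⟩)
      · exact Or.inl ((hlink r hr).mp hin)
      · have hx0 : emb k r0 ∈ s := (hlink r0 hr0).mp hmemr
        refine Or.inr ⟨emb k r0, hx0, ?_⟩
        have heq : r = (r0 + bI.toNat) % k.natAbs := by exact_mod_cast he
        rw [step_emb hk hbb, ← heq]
    · rintro (hin | ⟨x, hx, he⟩)
      · exact Or.inl ((hlink r hr).mpr hin)
      · obtain ⟨r0, hr0, hre⟩ := hrange x hx
        refine Or.inr ⟨r0, hr0, (hlink r0 hr0).mpr (hre ▸ hx), ?_⟩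
        have hstep' := step_emb hk (r0 := r0) hbb
        rw [hre] at he
        have := emb_inj hk hr (Nat.mod_lt _ (by omega)) (he.trans hstep')
        exact_mod_cast congrArg (fun t : Nat => (t : Int)) this

theorem reach_inv_fold {k : Int} (hk : k ≠ 0) (den : List Int) {s reach : List Int}
    (h : ReachInv k s reach) :
    ReachInv k (den.foldl (stepA k) s) (den.foldl (stepB |k|) reach) := by
  induction den generalizing s reach with
  | nil => exact h
  | cons a t ih => exact ih (reach_inv_step hk h a)

theorem emb_zero {k : Int} (hk : k ≠ 0) : emb k 0 = 0 :=
  pymod_eq_of hk (by simp) ⟨fun hgt => ⟨le_refl 0, hgt⟩, fun hlt => ⟨hlt, le_refl 0⟩⟩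

theorem reach_inv_init {k : Int} (hk : k ≠ 0) : ReachInv k (PySem.Set.ofList [0]) [0] := by
  have hm : 0 < k.natAbs := Int.natAbs_pos.mpr hk
  refine ⟨PySem.Set.nodup_ofList _, ?_, ?_, ?_, ?_⟩
  · intro x hx
    rw [PySem.Set.mem_ofList] at hx
    simp at hx
    exact ⟨0, hm, by rw [hx, emb_zero hk]⟩
  · simp
  · intro z hz
    simp at hz
    subst hz
    exact ⟨le_refl 0, by exact_mod_cast hm⟩
  · intro r hr
    rw [PySem.Set.mem_ofList]
    simp only [List.mem_singleton]
    constructor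
    · intro h
      have : r = 0 := by exact_mod_cast h
      rw [this, emb_zero hk]
    · intro h
      rw [← emb_zero hk] at h
      have : r = 0 := emb_inj hk hr hm h
      simp [this]

-- ===== VERDICT (by name: the statement is the Claim_ definition above) =====
theorem find_divine_numbers_spec : Claim_equal_find_divine_numbers := by
  intro n k den _ hk
  unfold Spec_find_divine_numbers find_divine_numbers find_divine_numbers_alt
  have hm : 0 < k.natAbs := Int.natAbs_pos.mpr hk
  obtain ⟨hnd, hrange, hpw, hbnd, hlink⟩ := reach_inv_fold hk den (reach_inv_init hk)
  set s := den.foldl (stepA k) (PySem.Set.ofList [0]) with hs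
  set reach := den.foldl (stepB |k|) [0] with hreach
  set L := reach.map (fun r => PySem.Int.mod r k) with hL
  have hmemL : ∀ x, x ∈ L ↔ x ∈ s := by
    intro x
    rw [hL]
    simp only [List.mem_map]
    constructor
    · rintro ⟨r, hmem, he⟩
      obtain ⟨hr0, hrm⟩ := hbnd r hmem
      have hrn : r.toNat < k.natAbs := by omega
      have hce : PySem.Int.mod r k = emb k r.toNat := by
        unfold emb; rw [Int.toNat_of_nonneg hr0]
      rw [hce] at he
      refine he ▸ (hlink r.toNat hrn).mp ?_
      rwa [Int.toNat_of_nonneg hr0]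
    · intro hx
      obtain ⟨r, hrlt, hre⟩ := hrange x hx
      refine ⟨(r : Int), (hlink r hrlt).mpr (hre ▸ hx), ?_⟩
      show PySem.Int.mod ((r : Nat) : Int) k = x
      rw [hre]; rfl
  have hndL : L.Nodup := by
    rw [hL]
    apply List.Nodup.map_on
    · intro r1 h1 r2 h2 he
      obtain ⟨h10, h1m⟩ := hbnd r1 h1
      obtain ⟨h20, h2m⟩ := hbnd r2 h2
      have e1 : PySem.Int.mod r1 k = emb k r1.toNat := by
        unfold emb; rw [Int.toNat_of_nonneg h10]
      have e2 : PySem.Int.mod r2 k = emb k r2.toNat := by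
        unfold emb; rw [Int.toNat_of_nonneg h20]
      rw [e1, e2] at he
      have := emb_inj hk (r := r1.toNat) (r' := r2.toNat) (by omega) (by omega) he
      omega
    · exact hpw.imp (fun h => ne_of_lt h)
  have hperm : L.Perm s := (List.perm_ext_iff_of_nodup hndL hnd).mpr hmemL
  have hsorted : PySem.List.sorted s (fun x => x) false = PySem.List.sorted L (fun x => x) false :=
    PySem.List.sorted_eq_sorted_of_perm s L (fun x => x) (fun a b h => h) hperm.symm
  exact congrArg (fun l : List Int => ((l.length : Int), l)) hsorted
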